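-- pv_equiv track=rewrite | github.com/mmagnus/rna-tools | rna_pdb_tools/utils/rna_convert_pseudoknot_formats/rna_pk_simrna_to_one_line.py | get_one_line
-- ===== SOURCE A (Python) =====
-- SECOND_PK_CHAR = ['{', '}']
--
-- def get_one_line(lines):
--     if len(lines) == 2:
--             ss = ''
--             for i,j in zip(lines[0], lines[1]):
--                 if j == '(':
--                     i = '['
--                 if j == ')':
--                     i = ']'
--                 ss += i
--     if len(lines) == 3:
--             ss = ''
--             for i,j,k in zip(lines[0], lines[1], lines[2]):
--                 if j == '(':
--                     i = '['
--                 if j == ')':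
--                     i = ']'
--                 if k == '(':
--                     i = SECOND_PK_CHAR[0]
--                 if k == ')':
--                     i = SECOND_PK_CHAR[1]
--                 ss += i
--     return ss
-- ===== SOURCE B (Python) =====
-- SECOND_PK_CHAR = ['{', '}']
--
-- def get_one_line(lines):
--     if len(lines) == 2:
--         n = min(len(lines[0]), len(lines[1]))
--         buf = list(lines[0][:n])
--         for idx, ch in enumerate(lines[1][:n]):
--             if ch == '(':
--                 buf[idx] = '['
--             elif ch == ')':
--                 buf[idx] = ']'
--         ss = ''.join(buf)
--     if len(lines) == 3:
--         n = min(len(lines[0]), len(lines[1]), len(lines[2]))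
--         buf = list(lines[0][:n])
--         for idx, ch in enumerate(lines[1][:n]):
--             if ch == '(':
--                 buf[idx] = '['
--             elif ch == ')':
--                 buf[idx] = ']'
--         for idx, ch in enumerate(lines[2][:n]):
--             if ch == '(':
--                 buf[idx] = SECOND_PK_CHAR[0]
--             elif ch == ')':
--                 buf[idx] = SECOND_PK_CHAR[1]
--         ss = ''.join(buf)
--     return ss
-- ===== Notes on version B (the rewrite author's own statement) =====
-- stated objective: alternative
-- what changed: Instead of A's single zip loop that rewrites each character while concatenating a string, B truncates the first line to the common length into a mutable buffer and applies one overlay pass per pseudoknot line (line 2 after line 1, so later lines keep precedence), then joins the buffer; Pre_ excludes lists of length other than 2 or 3, on which both A and B raise UnboundLocalError.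
import Mathlib
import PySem

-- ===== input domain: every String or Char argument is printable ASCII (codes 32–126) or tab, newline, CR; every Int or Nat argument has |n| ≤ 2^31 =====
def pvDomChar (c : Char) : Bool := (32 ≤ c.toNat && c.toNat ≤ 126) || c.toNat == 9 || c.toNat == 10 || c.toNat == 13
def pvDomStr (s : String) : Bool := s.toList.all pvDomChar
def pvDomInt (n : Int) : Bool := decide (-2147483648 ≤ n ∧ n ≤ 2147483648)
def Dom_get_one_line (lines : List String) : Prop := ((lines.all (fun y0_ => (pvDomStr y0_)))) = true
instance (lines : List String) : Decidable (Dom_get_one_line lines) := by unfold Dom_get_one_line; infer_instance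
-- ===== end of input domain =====

-- B merges the lines by overlaying each pseudoknot line onto a buffer of the first line
-- instead of A's single zip loop with character rewriting; return values agree on Pre_.

-- ===== PORT A =====
-- SECOND_PK_CHAR = ['{', '}']  (a list of one-character strings; ported as Chars since only used as characters appended to ss)
def secondPkChar : List Char := ['{', '}']

def get_one_line (lines : List String) : String :=
  -- Python's ss is unbound before the ifs; Pre_ excludes lengths other than 2 and 3, where alone it is read unbound
  let ss : String := ""
  let ss := if lines.length = 2 then
      ((lines.getD 0 "").toList.zip (lines.getD 1 "").toList).foldl
        (fun ss p =>
          let i := p.1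
          let i := if p.2 = '(' then '[' else i
          let i := if p.2 = ')' then ']' else i
          ss.push i) ""
    else ss
  let ss := if lines.length = 3 then
      (((lines.getD 0 "").toList.zip (lines.getD 1 "").toList).zip (lines.getD 2 "").toList).foldl
        (fun ss p =>
          let i := p.1.1
          let i := if p.1.2 = '(' then '[' else i
          let i := if p.1.2 = ')' then ']' else i
          let i := if p.2 = '(' then secondPkChar.getD 0 ' ' else i
          let i := if p.2 = ')' then secondPkChar.getD 1 ' ' else i
          ss.push i) ""
    else ss
  ss

-- ===== PORT B =====
-- the 'for idx, ch in enumerate(ov): buf[idx] = …' overlay loop of Source B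
def pvOverlay (op cl : Char) (buf ov : List Char) : List Char :=
  (PySem.List.enumerate ov 0).foldl (fun b p =>
    if p.2 = '(' then PySem.List.pySetD b p.1 op
    else if p.2 = ')' then PySem.List.pySetD b p.1 cl
    else b) buf

def get_one_line_alt (lines : List String) : String :=
  let ss : String := ""
  let ss := if lines.length = 2 then
      let a := (lines.getD 0 "").toList
      let b := (lines.getD 1 "").toList
      let n := min a.length b.length      -- n = min(len(lines[0]), len(lines[1])); s[:n] for 0 ≤ n is take n
      String.mk (pvOverlay '[' ']' (a.take n) (b.take n))
    else ss
  let ss := if lines.length = 3 then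
      let a := (lines.getD 0 "").toList
      let b := (lines.getD 1 "").toList
      let c := (lines.getD 2 "").toList
      let n := min (min a.length b.length) c.length
      String.mk (pvOverlay '{' '}' (pvOverlay '[' ']' (a.take n) (b.take n)) (c.take n))
    else ss
  ss

-- ===== PRECONDITION & SPEC =====
-- Pre_ excludes lists of length other than 2 or 3: there Python's ss is never assigned and A raises UnboundLocalError.
def Pre_get_one_line (lines : List String) : Prop := lines.length = 2 ∨ lines.length = 3
instance (lines : List String) : Decidable (Pre_get_one_line lines) := by unfold Pre_get_one_line; infer_instance
def pvWitness_get_one_line : List String := ["((..))", ".(..)."]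

def Spec_get_one_line (lines : List String) (out : String) : Prop := out = get_one_line_alt lines
instance (lines : List String) (out : String) : Decidable (Spec_get_one_line lines out) := by unfold Spec_get_one_line; infer_instance

-- ===== CLAIM (what is proved, stated in full; the proofs are below) =====
def Claim_equal_get_one_line : Prop := ∀ (lines : List String), Dom_get_one_line lines → Pre_get_one_line lines → Spec_get_one_line lines (get_one_line lines)

-- ===== LEMMAS AND PROOFS =====

/-- A's string-push fold builds the String.mk of the mapped list. -/
lemma foldl_push_eq {α : Type} (f : α → Char) :
    ∀ (l : List α) (s : String),
      l.foldl (fun ss x => ss.push (f x)) s = String.mk (s.toList ++ l.map f) := by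
  intro l
  induction l with
  | nil => intro s; simp [String.mk]
  | cons x xs ih =>
      intro s
      simp only [List.foldl_cons, List.map_cons, ih]
      congr 1
      simp

/-- The overlay fold, generalised over the start offset, equals a zip-map. -/
lemma overlay_aux (op cl : Char) :
    ∀ (ov pre buf : List Char), buf.length = ov.length →
      ((PySem.List.enumerate ov (pre.length : Int)).foldl (fun b p =>
          if p.2 = '(' then PySem.List.pySetD b p.1 op
          else if p.2 = ')' then PySem.List.pySetD b p.1 cl
          else b) (pre ++ buf))
        = pre ++ (buf.zip ov).map (fun p => if p.2 = '(' then op else if p.2 = ')' then cl else p.1) := by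
  intro ov
  induction ov with
  | nil =>
      intro pre buf h
      have hb : buf = [] := List.eq_nil_of_length_eq_zero (by simpa using h)
      subst hb
      simp [PySem.List.enumerate_nil]
  | cons c ov ih =>
      intro pre buf h
      cases buf with
      | nil => simp at h
      | cons b0 buf =>
          simp only [PySem.List.enumerate_cons, List.foldl_cons]
          have hset : ∀ v : Char,
              (if c = '(' then PySem.List.pySetD (pre ++ b0 :: buf) (pre.length : Int) op
               else if c = ')' then PySem.List.pySetD (pre ++ b0 :: buf) (pre.length : Int) cl
               else (pre ++ b0 :: buf))
              = pre ++ (if c = '(' then op else if c = ')' then cl else b0) :: buf := by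
            intro _
            have hs : ∀ w : Char, PySem.List.pySetD (pre ++ b0 :: buf) (pre.length : Int) w
                = pre ++ w :: buf := by
              intro w
              rw [PySem.List.pySetD_natCast]
              simp
            split_ifs <;> simp [hs]
          rw [hset ' ']
          have hlen : ((pre.length : Int) + 1) = (((pre ++ [(if c = '(' then op else if c = ')' then cl else b0)]).length : Int)) := by
            simp
          have := ih (pre ++ [(if c = '(' then op else if c = ')' then cl else b0)]) buf (by simpa using h)
          rw [hlen, List.append_cons pre _ buf, this]
          simp

/-- The overlay loop on equal-length lists is a zip-map. -/
lemma overlay_eq (op cl : Char) (buf ov : List Char) (h : buf.length = ov.length) :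
    pvOverlay op cl buf ov
      = (buf.zip ov).map (fun p => if p.2 = '(' then op else if p.2 = ')' then cl else p.1) := by
  have := overlay_aux op cl ov [] buf h
  simpa [pvOverlay] using this

/-- Truncating both sides to the common length does not change the zip. -/
lemma zip_take_min (a b : List Char) :
    (a.take (min a.length b.length)).zip (b.take (min a.length b.length)) = a.zip b := by
  rw [List.zip, ← List.take_zipWith, ← List.zip]
  exact List.take_of_length_le (by simp)

/-- The two-line case: A's zip loop equals B's truncate-and-overlay. -/
lemma merge2 (a b : List Char) :
    (a.zip b).foldl (fun ss p =>
        let i := p.1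
        let i := if p.2 = '(' then '[' else i
        let i := if p.2 = ')' then ']' else i
        ss.push i) ""
    = String.mk (pvOverlay '[' ']' (a.take (min a.length b.length)) (b.take (min a.length b.length))) := by
  rw [foldl_push_eq (fun p : Char × Char => if p.2 = ')' then ']' else if p.2 = '(' then '[' else p.1) (a.zip b) ""]
  rw [overlay_eq _ _ _ _ (by simp), zip_take_min]
  congr 1
  simp only [String.toList_empty, List.nil_append]
  apply List.map_congr_left
  intro p _
  by_cases h1 : p.2 = '(' <;> by_cases h2 : p.2 = ')' <;> simp_all

/-- The three-line case: A's zip3 loop equals B's two successive overlays. -/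
lemma merge3 (a b c : List Char) :
    ((a.zip b).zip c).foldl (fun ss p =>
        let i := p.1.1
        let i := if p.1.2 = '(' then '[' else i
        let i := if p.1.2 = ')' then ']' else i
        let i := if p.2 = '(' then secondPkChar.getD 0 ' ' else i
        let i := if p.2 = ')' then secondPkChar.getD 1 ' ' else i
        ss.push i) ""
    = String.mk (pvOverlay '{' '}'
        (pvOverlay '[' ']' (a.take (min (min a.length b.length) c.length))
                           (b.take (min (min a.length b.length) c.length)))
        (c.take (min (min a.length b.length) c.length))) := by
  set n := min (min a.length b.length) c.length with hn
  have hab : (a.take n).zip (b.take n) = (a.zip b).take n := by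
    rw [List.zip, ← List.take_zipWith, ← List.zip]
  have h1 : pvOverlay '[' ']' (a.take n) (b.take n)
      = ((a.zip b).take n).map (fun p => if p.2 = '(' then '[' else if p.2 = ')' then ']' else p.1) := by
    rw [overlay_eq _ _ _ _ (by simp [hn]), hab]
  have hlen1 : (((a.zip b).take n).map (fun p => if p.2 = '(' then '[' else if p.2 = ')' then ']' else p.1)).length
      = (c.take n).length := by simp [hn]
  rw [foldl_push_eq (fun p : (Char × Char) × Char =>
        if p.2 = ')' then secondPkChar.getD 1 ' '
        else if p.2 = '(' then secondPkChar.getD 0 ' '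
        else if p.1.2 = ')' then ']' else if p.1.2 = '(' then '[' else p.1.1) ((a.zip b).zip c) ""]
  rw [h1, overlay_eq _ _ _ _ hlen1]
  rw [List.zip_map_left, List.map_map]
  have hzip3 : ((a.zip b).take n).zip (c.take n) = (a.zip b).zip c := by
    rw [List.zip, ← List.take_zipWith, ← List.zip]
    exact List.take_of_length_le (by simp [hn])
  rw [hzip3]
  congr 1
  simp only [String.toList_empty, List.nil_append]
  apply List.map_congr_left
  intro p _
  simp only [Function.comp, Prod.map, id]
  by_cases k1 : p.2 = '(' <;> by_cases k2 : p.2 = ')' <;>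
    by_cases j1 : p.1.2 = '(' <;> by_cases j2 : p.1.2 = ')' <;>
    simp_all [secondPkChar]

-- ===== VERDICT (by name: the statement is the Claim_ definition above) =====
theorem get_one_line_spec : Claim_equal_get_one_line := by
  intro lines _ hpre
  unfold Spec_get_one_line get_one_line get_one_line_alt
  rcases hpre with h | h
  · simp only [h, if_neg (by omega : ¬ (2 = 3))]
    exact merge2 _ _
  · simp only [h, if_neg (by omega : ¬ (3 = 2))]
    exact merge3 _ _ _
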